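-- pv_equiv track=rewrite | github.com/linguistic76/skuel | app/core/services/askesis/context_retriever.py | _identify_quick_wins_and_high_impact
-- ===== SOURCE A (Python) =====
-- from typing import TYPE_CHECKING, Any, Protocol, runtime_checkable
--
-- def _identify_quick_wins_and_high_impact(
--     gap_analysis: list[dict[str, Any]]
-- ) -> tuple[list[dict[str, Any]], list[dict[str, Any]]]:
--     """
--     Identify quick wins and high-impact gaps from gap analysis.
--
--     Quick wins: Knowledge with minimal prerequisites (0-1) that still unlocks content.
--     High-impact: Knowledge that unlocks many other pieces (> 3 dependents).
--
--     Args: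
--         gap_analysis: Gap analysis results from _analyze_blocked_knowledge_prerequisites
--
--     Returns:
--         Tuple of (quick_wins, high_impact_gaps) - each sorted by impact
--     """
--     quick_wins = []
--     high_impact = []
--
--     for gap in gap_analysis:
--         prereq_count = gap.get("prerequisite_count", 0)
--         unlocks_count = gap.get("unlocks_count", 0)
--
--         # Quick wins: Ready or nearly ready, still useful
--         if prereq_count <= 1 and unlocks_count > 0:
--             quick_wins.append(gap)
--
--         # High-impact: Blocking many things
--         if unlocks_count > 3:
--             high_impact.append(gap)
--
--     # Sort by impact (unlocks_count descending)
--     def by_unlocks(gap: dict[str, Any]) -> int: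
--         return gap.get("unlocks_count", 0)
--
--     quick_wins.sort(key=by_unlocks, reverse=True)
--     high_impact.sort(key=by_unlocks, reverse=True)
--
--     # Limit to top 5 each
--     return quick_wins[:5], high_impact[:5]
-- ===== SOURCE B (Python) =====
-- def _identify_quick_wins_and_high_impact(gap_analysis):
--     def by_unlocks(gap):
--         return gap.get("unlocks_count", 0)
--
--     # Sort the whole analysis once (stable, descending by impact); then the
--     # filtered sublists are already in the required order, so just filter and slice.
--     ranked = sorted(gap_analysis, key=by_unlocks, reverse=True)
--
--     quick_wins = [g for g in ranked
--                   if g.get("prerequisite_count", 0) <= 1 and by_unlocks(g) > 0][:5]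
--     high_impact = [g for g in ranked if by_unlocks(g) > 3][:5]
--     return quick_wins, high_impact
-- ===== Notes on version B (the rewrite author's own statement) =====
-- stated objective: alternative
-- what changed: B sorts the whole gap list once (stable, descending by unlocks_count) and then only filters and slices, instead of A's filter-first loop followed by two separate sorts; equality relies on stable sort commuting with filtering.
import Mathlib
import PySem

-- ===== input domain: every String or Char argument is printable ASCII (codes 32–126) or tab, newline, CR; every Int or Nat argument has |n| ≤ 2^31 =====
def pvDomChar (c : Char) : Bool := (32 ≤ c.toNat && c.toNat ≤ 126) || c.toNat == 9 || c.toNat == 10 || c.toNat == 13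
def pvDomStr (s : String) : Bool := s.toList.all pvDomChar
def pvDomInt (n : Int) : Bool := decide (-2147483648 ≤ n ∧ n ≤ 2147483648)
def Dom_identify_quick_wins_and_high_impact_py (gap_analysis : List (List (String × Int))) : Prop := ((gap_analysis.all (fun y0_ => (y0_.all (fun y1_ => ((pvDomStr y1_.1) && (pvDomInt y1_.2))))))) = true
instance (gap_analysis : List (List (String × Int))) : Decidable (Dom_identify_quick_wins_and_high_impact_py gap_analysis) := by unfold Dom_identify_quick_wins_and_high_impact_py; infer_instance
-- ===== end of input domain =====

-- B sorts the whole gap list once (stable, descending) and then only filters and slices,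
-- instead of A's filter-first loop followed by two separate sorts; same return value.


-- ===== PORT A =====
-- Shared literal helpers: the gap.get(...) reads and the two filter conditions,
-- written identically in both Pythons.
def pvUnlocks (gap : List (String × Int)) : Int :=
  PySem.Dict.getD ⟨gap⟩ "unlocks_count" 0

def pvIsQuick (gap : List (String × Int)) : Bool :=
  decide (PySem.Dict.getD ⟨gap⟩ "prerequisite_count" (0:Int) <= 1) && decide (0 < pvUnlocks gap)

def pvIsHigh (gap : List (String × Int)) : Bool :=
  decide (3 < pvUnlocks gap)

-- Port of A: one loop appending to both lists, then sort each filtered list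
-- (stable, descending by unlocks) and slice [:5].
def identify_quick_wins_and_high_impact_py (gap_analysis : List (List (String × Int))) : (List (List (String × Int))) × (List (List (String × Int))) :=
  let r := gap_analysis.foldl
    (fun acc gap =>
      (if pvIsQuick gap then acc.1 ++ [gap] else acc.1,
       if pvIsHigh gap then acc.2 ++ [gap] else acc.2))
    ([], [])
  (PySem.List.slice (PySem.List.sorted r.1 pvUnlocks true) none (some 5),
   PySem.List.slice (PySem.List.sorted r.2 pvUnlocks true) none (some 5))


-- ===== PORT B =====
-- Port of B: sort the whole list once (stable, descending by unlocks),
-- then just filter and slice [:5].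
def identify_quick_wins_and_high_impact_py_alt (gap_analysis : List (List (String × Int))) : (List (List (String × Int))) × (List (List (String × Int))) :=
  let ranked := PySem.List.sorted gap_analysis pvUnlocks true
  (PySem.List.slice (ranked.filter pvIsQuick) none (some 5),
   PySem.List.slice (ranked.filter pvIsHigh) none (some 5))


-- ===== PRECONDITION & SPEC =====
def Spec_identify_quick_wins_and_high_impact_py (gap_analysis : List (List (String × Int))) (out : (List (List (String × Int))) × (List (List (String × Int)))) : Prop := out = identify_quick_wins_and_high_impact_py_alt gap_analysis
instance (gap_analysis : List (List (String × Int))) (out : (List (List (String × Int))) × (List (List (String × Int)))) : Decidable (Spec_identify_quick_wins_and_high_impact_py gap_analysis out) := by unfold Spec_identify_quick_wins_and_high_impact_py; infer_instance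

-- ===== CLAIM (what is proved, stated in full; the proofs are below) =====
def Claim_equal_identify_quick_wins_and_high_impact_py : Prop := ∀ (gap_analysis : List (List (String × Int))), Dom_identify_quick_wins_and_high_impact_py gap_analysis → Spec_identify_quick_wins_and_high_impact_py gap_analysis (identify_quick_wins_and_high_impact_py gap_analysis)

-- ===== LEMMAS AND PROOFS =====

-- The insertion relation of sorted(., key=pvUnlocks, reverse=True).
def pvBef (a b : List (String × Int)) : Bool := decide (pvUnlocks b < pvUnlocks a)

lemma pv_insertBy_all_before (x : List (String × Int)) (l : List (List (String × Int)))
    (h : ∀ z ∈ l, pvBef x z = true) :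
    PySem.List.insertBy pvBef x l = x :: l := by
  cases l with
  | nil => simp [PySem.List.insertBy]
  | cons y ys => simp [PySem.List.insertBy, h y (by simp)]

lemma pv_pairwise_insertBy (x : List (String × Int)) (acc : List (List (String × Int)))
    (h : acc.Pairwise (fun a b => pvUnlocks b <= pvUnlocks a)) :
    (PySem.List.insertBy pvBef x acc).Pairwise (fun a b => pvUnlocks b <= pvUnlocks a) := by
  induction acc with
  | nil => simp [PySem.List.insertBy]
  | cons y ys ih =>
    rcases List.pairwise_cons.mp h with ⟨hy, hys⟩
    by_cases hb : pvBef x y = true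
    · have hxy : pvUnlocks y < pvUnlocks x := by simpa [pvBef] using hb
      simp only [PySem.List.insertBy, hb, if_true]
      refine List.pairwise_cons.mpr ⟨?_, h⟩
      intro z hz
      rcases List.mem_cons.mp hz with hz | hz
      · exact le_of_lt (hz ▸ hxy)
      · exact le_trans (hy z hz) (le_of_lt hxy)
    · simp only [PySem.List.insertBy, hb]
      refine List.pairwise_cons.mpr ⟨?_, ih hys⟩
      intro z hz
      rcases (PySem.List.mem_insertBy pvBef x z ys).mp hz with hz | hz
      · subst hz
        simpa [pvBef] using hb
      · exact hy z hz

lemma pv_filter_insertBy (p : List (String × Int) → Bool) (x : List (String × Int))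
    (acc : List (List (String × Int)))
    (h : acc.Pairwise (fun a b => pvUnlocks b <= pvUnlocks a)) :
    (PySem.List.insertBy pvBef x acc).filter p =
      if p x then PySem.List.insertBy pvBef x (acc.filter p) else acc.filter p := by
  induction acc with
  | nil => by_cases hp : p x = true <;> simp [PySem.List.insertBy, hp]
  | cons y ys ih =>
    rcases List.pairwise_cons.mp h with ⟨hy, hys⟩
    by_cases hb : pvBef x y = true
    · have hxy : pvUnlocks y < pvUnlocks x := by simpa [pvBef] using hb
      simp only [PySem.List.insertBy, hb, if_true]
      by_cases hp : p x = true
      · by_cases hpy : p y = true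
        · simp [hp, hpy, PySem.List.insertBy, hb]
        · have hall : ∀ z ∈ ys.filter p, pvBef x z = true := by
            intro z hz
            have hzy := hy z (List.mem_of_mem_filter hz)
            simp only [pvBef, decide_eq_true_eq]
            exact lt_of_le_of_lt hzy hxy
          simp [hp, hpy, pv_insertBy_all_before x _ hall]
      · simp [List.filter_cons, hp]
    · simp only [PySem.List.insertBy, hb]
      by_cases hp : p x = true
      · by_cases hpy : p y = true
        · simp [hpy, ih hys, hp, PySem.List.insertBy, hb]
        · simp [hpy, ih hys, hp]
      · by_cases hpy : p y = true <;> simp [hpy, ih hys, hp]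

lemma pv_foldl_filter (p : List (String × Int) → Bool) (xs : List (List (String × Int))) :
    ∀ acc, acc.Pairwise (fun a b => pvUnlocks b <= pvUnlocks a) →
      (xs.foldl (fun acc x => PySem.List.insertBy pvBef x acc) acc).filter p =
        (xs.filter p).foldl (fun acc x => PySem.List.insertBy pvBef x acc) (acc.filter p) := by
  induction xs with
  | nil => intro acc _; simp
  | cons x xs ih =>
    intro acc hacc
    have hins := pv_pairwise_insertBy x acc hacc
    by_cases hp : p x = true
    · simp only [List.foldl_cons, List.filter_cons, hp, if_true,
        ih _ hins, pv_filter_insertBy p x acc hacc]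
    · simp only [List.foldl_cons, List.filter_cons, hp, Bool.false_eq_true, if_false,
        ih _ hins, pv_filter_insertBy p x acc hacc]

-- Stable sort commutes with filtering: sorting the filtered list equals
-- filtering the sorted list.
lemma pv_filter_sorted (p : List (String × Int) → Bool) (xs : List (List (String × Int))) :
    PySem.List.sorted (xs.filter p) pvUnlocks true =
      (PySem.List.sorted xs pvUnlocks true).filter p := by
  rw [PySem.List.sorted_rev_eq_foldl_insertBy, PySem.List.sorted_rev_eq_foldl_insertBy]
  have := pv_foldl_filter p xs [] (by simp)
  simpa [pvBef] using this.symm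

-- ===== VERDICT (by name: the statement is the Claim_ definition above) =====
theorem identify_quick_wins_and_high_impact_py_spec : Claim_equal_identify_quick_wins_and_high_impact_py := by
  intro gap_analysis _
  unfold Spec_identify_quick_wins_and_high_impact_py
  unfold identify_quick_wins_and_high_impact_py identify_quick_wins_and_high_impact_py_alt
  rw [PySem.List.foldl_prod_mk
    (fun acc gap => if pvIsQuick gap then acc ++ [gap] else acc)
    (fun acc gap => if pvIsHigh gap then acc ++ [gap] else acc)]
  have h1 := PySem.List.foldl_append_if pvIsQuick (fun g => g) gap_analysis []
  have h2 := PySem.List.foldl_append_if pvIsHigh (fun g => g) gap_analysis []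
  simp only [List.nil_append, show (fun (g : List (String × Int)) => g) = id from rfl,
    List.map_id] at h1 h2
  simp only [h1, h2]
  rw [pv_filter_sorted pvIsQuick gap_analysis, pv_filter_sorted pvIsHigh gap_analysis]
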